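-- pv_equiv track=rewrite | github.com/jisuncho/Programmers-code | 87946.py | solution
-- ===== SOURCE A (Python) =====
-- from collections import deque
-- import copy
--
-- def solution(k, dungeons):
--     answer = -1
--     s = deque()
--     for i in range(len(dungeons)):
--         temp = [False] * len(dungeons)
--         if dungeons[i][0] <= k:
--             temp[i] = True
--             s.append((temp, k - dungeons[i][1], 1))
--
--     while s:
--         visited, nk, count = s.pop()
--         flag = False
--         for i in range(len(dungeons)):
--             temp = copy.deepcopy(visited)
--             if visited[i] == False and dungeons[i][0] <= nk:
--                 flag = True
--                 temp[i] = True
--                 s.append((temp, nk - dungeons[i][1], count + 1))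
--         if flag == False:
--             answer = max(answer, count)
--     return answer
-- ===== SOURCE B (Python) =====
-- def solution(k, dungeons):
--     n = len(dungeons)
--
--     def best(visited, fatigue):
--         res = 0
--         for i in range(n):
--             if i not in visited and dungeons[i][0] <= fatigue:
--                 r = 1 + best(visited + [i], fatigue - dungeons[i][1])
--                 if r > res:
--                     res = r
--         return res
--
--     return best([], k)
-- ===== Notes on version B (the rewrite author's own statement) =====
-- stated objective: simpler
-- what changed: replaces the explicit stack of deepcopied boolean visited arrays with dead-end answer tracking by direct recursive backtracking over a list of cleared indices that returns the best number of additional clears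
-- intended difference: when no dungeon's required fatigue is <= k (including an empty dungeon list) A returns -1 because its answer variable is never updated, while B returns 0, the intended count of clearable dungeons — e.g. on solution(0, [[1, 1]]): A returns -1, B returns 0
-- outside the precondition, e.g. on solution(0, [[5]]): A returns -1, B returns 0
import Mathlib
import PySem

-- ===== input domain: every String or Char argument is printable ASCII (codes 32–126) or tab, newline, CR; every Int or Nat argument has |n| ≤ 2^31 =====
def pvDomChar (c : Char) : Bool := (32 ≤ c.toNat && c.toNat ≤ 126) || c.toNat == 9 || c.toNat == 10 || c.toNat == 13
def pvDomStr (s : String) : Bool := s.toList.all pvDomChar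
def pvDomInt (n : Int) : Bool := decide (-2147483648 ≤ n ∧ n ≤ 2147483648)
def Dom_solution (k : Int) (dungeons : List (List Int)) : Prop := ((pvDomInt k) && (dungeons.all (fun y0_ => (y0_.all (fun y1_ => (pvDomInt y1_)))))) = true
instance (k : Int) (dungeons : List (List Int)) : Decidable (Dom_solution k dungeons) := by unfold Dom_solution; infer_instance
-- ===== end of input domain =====

-- B replaces A's explicit stack of deepcopied boolean visited lists (answer recorded at dead ends)
-- by direct recursive backtracking over a list of cleared indices; same exhaustive search, simpler.

-- ===== PORT A =====
-- dungeons[i][0] / dungeons[i][1]; both ports only index with 0 ≤ i < len, where List.getD is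
-- exactly Python indexing; rows have ≥ 2 entries on Pre_, so the inner getD is exact there too.
def reqOf (d : List (List Int)) (i : Nat) : Int := (d.getD i []).getD 0 0
def costOf (d : List (List Int)) (i : Nat) : Int := (d.getD i []).getD 1 0

-- the inner `for i in range(len(dungeons))` of A's while-loop: every state pushed for (visited, nk, count)
def pvChildren (d : List (List Int)) (v : List Bool) (nk c : Int) :
    List (List Bool × Int × Int) :=
  (List.range d.length).filterMap (fun i =>
    if v.getD i true = false ∧ reqOf d i ≤ nk then
      some (v.set i true, nk - costOf d i, c + 1)
    else none)

lemma mem_pvChildren {d : List (List Int)} {v : List Bool} {nk c : Int}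
    {s : List Bool × Int × Int} :
    s ∈ pvChildren d v nk c ↔
      ∃ i, i < d.length ∧ v.getD i true = false ∧ reqOf d i ≤ nk ∧
        s = (v.set i true, nk - costOf d i, c + 1) := by
  simp only [pvChildren, List.mem_filterMap, List.mem_range]
  constructor
  · rintro ⟨i, hi, hs⟩
    split_ifs at hs with h
    · exact ⟨i, hi, h.1, h.2, (Option.some_inj.mp hs).symm⟩
  · rintro ⟨i, hi, h1, h2, rfl⟩
    exact ⟨i, hi, by rw [if_pos ⟨h1, h2⟩]⟩

-- setting a false entry to true removes exactly one false
lemma count_false_set_true {v : List Bool} {i : Nat} (h : v.getD i true = false) :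
    (v.set i true).count false + 1 = v.count false := by
  have hlt : i < v.length := by
    by_contra hn
    rw [not_lt] at hn
    rw [List.getD_eq_default _ _ hn] at h
    cases h
  have hv : v[i] = false := by rwa [List.getD_eq_getElem v true hlt] at h
  have hdec : v = v.take i ++ v[i] :: v.drop (i + 1) := by
    conv_lhs => rw [← List.take_append_drop i v]
    rw [List.drop_eq_getElem_cons hlt]
  rw [List.set_eq_take_append_cons_drop, if_pos hlt]
  conv_rhs => rw [hdec]
  simp only [List.count_append, List.count_cons, hv]
  simp
  omega

-- stack measure: each state weighs (n+1)^(number of unvisited dungeons)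
def pvMu (d : List (List Int)) (st : List (List Bool × Int × Int)) : Nat :=
  (st.map (fun s => (d.length + 1) ^ (s.1.count false))).sum

lemma pvChildren_mu_lt {d : List (List Int)} {v : List Bool} {nk c : Int}
    (hne : pvChildren d v nk c ≠ []) :
    pvMu d (pvChildren d v nk c) < (d.length + 1) ^ (v.count false) := by
  obtain ⟨s0, hs0⟩ := List.exists_mem_of_ne_nil _ hne
  obtain ⟨i0, _, h0, _, rfl⟩ := mem_pvChildren.1 hs0
  have hf1 : 1 ≤ v.count false := by
    have := count_false_set_true h0; omega
  have hcnt : ∀ s ∈ pvChildren d v nk c, s.1.count false = v.count false - 1 := by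
    intro s hs
    obtain ⟨i, _, hfi, _, rfl⟩ := mem_pvChildren.1 hs
    have h2 := count_false_set_true hfi
    show (v.set i true).count false = v.count false - 1
    omega
  have hbd : ∀ x ∈ (pvChildren d v nk c).map
      (fun s => (d.length + 1) ^ (s.1.count false)),
      x ≤ (d.length + 1) ^ (v.count false - 1) := by
    intro x hx
    obtain ⟨s, hs, rfl⟩ := List.mem_map.1 hx
    rw [hcnt s hs]
  have hlen : (pvChildren d v nk c).length ≤ d.length := by
    have := List.length_filterMap_le (fun i =>
      if v.getD i true = false ∧ reqOf d i ≤ nk then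
        some (v.set i true, nk - costOf d i, c + 1)
      else none) (List.range d.length)
    simpa [pvChildren] using this
  calc pvMu d (pvChildren d v nk c)
      ≤ ((pvChildren d v nk c).map
          (fun s => (d.length + 1) ^ (s.1.count false))).length •
          (d.length + 1) ^ (v.count false - 1) :=
        List.sum_le_card_nsmul _ _ hbd
    _ = (pvChildren d v nk c).length * (d.length + 1) ^ (v.count false - 1) := by
        simp [smul_eq_mul]
    _ ≤ d.length * (d.length + 1) ^ (v.count false - 1) :=
        Nat.mul_le_mul_right _ hlen
    _ < (d.length + 1) * (d.length + 1) ^ (v.count false - 1) :=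
        (Nat.mul_lt_mul_right (Nat.pow_pos (by omega))).mpr (by omega)
    _ = (d.length + 1) ^ (v.count false) := by
        rw [← pow_succ']
        congr 1
        omega

-- A's while-loop over the deque; the deque is popped from the RIGHT, so the stack is kept
-- reversed here (head = next pop) and newly pushed children are prepended in reverse order.
def pvLoop (d : List (List Int)) (stack : List (List Bool × Int × Int)) (answer : Int) : Int :=
  match stack with
  | [] => answer
  | (v, nk, c) :: rest =>
    let ch := pvChildren d v nk c
    if _h : ch = [] then pvLoop d rest (max answer c)   -- flag == False: dead end, record count
    else pvLoop d (ch.reverse ++ rest) answer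
termination_by pvMu d stack
decreasing_by
  · simp only [pvMu, List.map_cons, List.sum_cons]
    have : 0 < (d.length + 1) ^ (v.count false) := Nat.pow_pos (by omega)
    omega
  · simp only [pvMu, List.map_cons, List.sum_cons, List.map_append, List.sum_append,
      List.map_reverse, List.sum_reverse]
    have := pvChildren_mu_lt (d := d) (v := v) (nk := nk) (c := c) _h
    simp only [pvMu] at this
    omega

def solution (k : Int) (dungeons : List (List Int)) : Int :=
  -- the initial for-loop: pushes a start state for every i with dungeons[i][0] <= k
  let init := (List.range dungeons.length).filterMap (fun i =>
    if reqOf dungeons i ≤ k then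
      some ((List.replicate dungeons.length false).set i true, k - costOf dungeons i, (1 : Int))
    else none)
  pvLoop dungeons init.reverse (-1)

-- ===== PORT B =====
-- termination: appending a fresh index shrinks the set of unvisited indices
lemma pvAvail_decrease {n : Nat} {V : List Nat} {i : Nat}
    (hi : i ∈ List.range n) (hni : i ∉ V) :
    (List.range n).countP (fun j => decide (j ∉ V ++ [i])) <
      (List.range n).countP (fun j => decide (j ∉ V)) := by
  have hperm := List.perm_cons_erase hi
  rw [hperm.countP_eq, hperm.countP_eq]
  have hmono : ((List.range n).erase i).countP (fun j => decide (j ∉ V ++ [i])) ≤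
      ((List.range n).erase i).countP (fun j => decide (j ∉ V)) := by
    apply List.countP_mono_left
    intro x _ hx
    simp only [decide_eq_true_eq, List.mem_append, List.mem_singleton] at hx ⊢
    exact fun hxV => hx (Or.inl hxV)
  have hpi : decide (i ∉ V ++ [i]) = false := by simp
  have hqi : decide (i ∉ V) = true := by simpa using hni
  rw [List.countP_cons, List.countP_cons, hpi, hqi]
  simp only [if_true, if_false, Bool.false_eq_true]
  omega

-- `def best(visited, fatigue)` of B: fold of the for-loop over range(n) (attach only carries
-- the membership proof needed for termination)
def bestRec (d : List (List Int)) (V : List Nat) (fatigue : Int) : Int :=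
  (List.range d.length).attach.foldl
    (fun res i =>
      if h : i.1 ∉ V ∧ reqOf d i.1 ≤ fatigue then
        let r := 1 + bestRec d (V ++ [i.1]) (fatigue - costOf d i.1)
        if res < r then r else res
      else res) 0
termination_by (List.range d.length).countP (fun j => decide (j ∉ V))
decreasing_by
  exact pvAvail_decrease i.2 h.1

def solution_alt (k : Int) (dungeons : List (List Int)) : Int :=
  bestRec dungeons [] k

-- ===== PRECONDITION & SPEC =====
-- Pre_ excludes rows with fewer than 2 entries: Python indexes dungeons[i][0] and dungeons[i][1],
-- so both programs raise IndexError on empty rows and on short rows whose cost is reached; A (and B)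
-- return on such input only accidentally, when a 1-entry row is never affordable.
def Pre_solution (k : Int) (dungeons : List (List Int)) : Prop :=
  ∀ row ∈ dungeons, 2 ≤ row.length
instance (k : Int) (dungeons : List (List Int)) : Decidable (Pre_solution k dungeons) := by
  unfold Pre_solution; infer_instance

def pvWitness_solution : Int × List (List Int) := (7, [[3, 2], [10, 1]])

-- When no dungeon's required fatigue is ≤ k (including an empty dungeon list), A returns -1
-- because its answer variable is never updated; B returns 0, the intended count of clearable dungeons.
def D_solution (k : Int) (dungeons : List (List Int)) : Prop :=
  ∀ row ∈ dungeons, k < row.getD 0 0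
instance (k : Int) (dungeons : List (List Int)) : Decidable (D_solution k dungeons) := by
  unfold D_solution; infer_instance

def Spec_solution (k : Int) (dungeons : List (List Int)) (out : Int) : Prop :=
  ¬ D_solution k dungeons → out = solution_alt k dungeons
instance (k : Int) (dungeons : List (List Int)) (out : Int) : Decidable (Spec_solution k dungeons out) := by
  unfold Spec_solution; infer_instance

def pvDiffWitness_solution : Int × List (List Int) := (0, [[1, 1]])
def pvDiffWitnessOut_solution : Int × Int := (-1, 0)

-- ===== CLAIM (what is proved, stated in full; the proofs are below) =====
def Claim_unchanged_solution : Prop := ∀ (k : Int) (dungeons : List (List Int)), Dom_solution k dungeons → Pre_solution k dungeons → Spec_solution k dungeons (solution k dungeons)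
def Claim_changed_solution : Prop := Dom_solution (pvDiffWitness_solution.1) (pvDiffWitness_solution.2) ∧ Pre_solution (pvDiffWitness_solution.1) (pvDiffWitness_solution.2) ∧ D_solution (pvDiffWitness_solution.1) (pvDiffWitness_solution.2) ∧ solution (pvDiffWitness_solution.1) (pvDiffWitness_solution.2) = pvDiffWitnessOut_solution.1 ∧ solution_alt (pvDiffWitness_solution.1) (pvDiffWitness_solution.2) = pvDiffWitnessOut_solution.2 ∧ pvDiffWitnessOut_solution.1 ≠ pvDiffWitnessOut_solution.2
def Claim_exact_solution : Prop := ∀ (k : Int) (dungeons : List (List Int)), Dom_solution k dungeons → Pre_solution k dungeons → D_solution k dungeons → solution k dungeons ≠ solution_alt k dungeons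

-- ===== LEMMAS AND PROOFS =====

-- running maximum over a list, the shape shared by all loops here
def pvF {α : Type} (φ : α → Int) (l : List α) (a : Int) : Int :=
  l.foldl (fun acc s => max acc (φ s)) a

lemma pvF_cons {α : Type} (φ : α → Int) (s : α) (l : List α) (a : Int) :
    pvF φ (s :: l) a = pvF φ l (max a (φ s)) := rfl

lemma pvF_max {α : Type} (φ : α → Int) (l : List α) :
    ∀ a b : Int, pvF φ l (max a b) = max (pvF φ l a) b := by
  induction l with
  | nil => intro a b; rfl
  | cons s t ih =>
    intro a b
    rw [pvF_cons, pvF_cons, max_right_comm, ih]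

lemma le_pvF {α : Type} (φ : α → Int) (l : List α) : ∀ a : Int, a ≤ pvF φ l a := by
  induction l with
  | nil => intro a; exact le_refl a
  | cons s t ih =>
    intro a
    rw [pvF_cons]
    exact le_trans (le_max_left _ _) (ih _)

lemma pvF_append {α : Type} (φ : α → Int) (l l' : List α) (a : Int) :
    pvF φ (l ++ l') a = pvF φ l' (pvF φ l a) := List.foldl_append

lemma pvF_reverse {α : Type} (φ : α → Int) (l : List α) : ∀ a : Int,
    pvF φ l.reverse a = pvF φ l a := by
  induction l with
  | nil => intro a; rfl
  | cons s t ih =>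
    intro a
    rw [List.reverse_cons, pvF_append, ih]
    show max (pvF φ t a) (φ s) = pvF φ (s :: t) a
    rw [pvF_cons, pvF_max]

lemma pvF_add {α : Type} (c : Int) (φ : α → Int) (l : List α) :
    ∀ a : Int, pvF (fun x => c + φ x) l (c + a) = c + pvF φ l a := by
  induction l with
  | nil => intro a; rfl
  | cons s t ih =>
    intro a
    rw [pvF_cons, pvF_cons, max_add_add_left, ih]

lemma pvF_map {α β : Type} (φ : β → Int) (f : α → β) (l : List α) (a : Int) :
    pvF φ (l.map f) a = pvF (fun x => φ (f x)) l a := by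
  simp [pvF, List.foldl_map]

-- the value of a state: the best number of additional clears from (visited, nk)
def pvG (d : List (List Int)) (v : List Bool) (nk : Int) : Int :=
  (pvChildren d v nk 0).attach.foldl
    (fun acc s => max acc (1 + pvG d s.1.1 s.1.2.1)) 0
termination_by v.count false
decreasing_by
  obtain ⟨i, _, hfi, _, hs⟩ := mem_pvChildren.1 s.2
  have h1 := count_false_set_true hfi
  have : s.1.1 = v.set i true := by rw [hs]
  rw [this]
  omega

lemma pvG_eq (d : List (List Int)) (v : List Bool) (nk : Int) :
    pvG d v nk = pvF (fun s => 1 + pvG d s.1 s.2.1) (pvChildren d v nk 0) 0 := by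
  rw [pvG]
  rw [List.foldl_attach (l := pvChildren d v nk 0)
    (f := fun acc s => max acc (1 + pvG d s.1 s.2.1)) (b := 0)]
  rfl

lemma pvG_nonneg (d : List (List Int)) (v : List Bool) (nk : Int) : 0 ≤ pvG d v nk := by
  rw [pvG_eq]
  exact le_pvF _ _ _

lemma pvChildren_shift (d : List (List Int)) (v : List Bool) (nk c : Int) :
    pvChildren d v nk c = (pvChildren d v nk 0).map (fun s => (s.1, s.2.1, c + 1)) := by
  unfold pvChildren
  rw [List.map_filterMap]
  apply List.filterMap_congr
  intro i _
  split_ifs with h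
  · simp
  · simp

lemma pvF_shift_nonempty {α : Type} (c : Int) (ψ : α → Int) {l : List α} (a : Int)
    (hne : l ≠ []) (hψ : ∀ x ∈ l, 0 ≤ ψ x) :
    pvF (fun x => c + ψ x) l a = max a (c + pvF ψ l 0) := by
  match l with
  | x :: xs =>
    rw [pvF_cons, pvF_cons, max_comm a (c + ψ x), pvF_max, pvF_add]
    rw [max_eq_right (hψ x (by simp))]
    rw [max_comm]

lemma pvF_ext {α : Type} {φ ψ : α → Int} (h : ∀ x, φ x = ψ x) (l : List α) (a : Int) :
    pvF φ l a = pvF ψ l a := by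
  rw [show φ = ψ from funext h]

lemma pvChildren_shift_ne {d : List (List Int)} {v : List Bool} {nk c : Int}
    (h : pvChildren d v nk c ≠ []) : pvChildren d v nk 0 ≠ [] := by
  intro h0
  exact h (by rw [pvChildren_shift d v nk c, h0]; rfl)

-- A's loop computes the running maximum, over the stack, of count + value of the state
lemma pvLoop_eq (d : List (List Int)) :
    ∀ (stack : List (List Bool × Int × Int)) (answer : Int),
      pvLoop d stack answer = pvF (fun s => s.2.2 + pvG d s.1 s.2.1) stack answer := by
  suffices H : ∀ (m : Nat) (stack : List (List Bool × Int × Int)) (answer : Int),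
      pvMu d stack = m →
      pvLoop d stack answer = pvF (fun s => s.2.2 + pvG d s.1 s.2.1) stack answer from
    fun st a => H _ st a rfl
  intro m
  induction m using Nat.strong_induction_on with
  | _ m IH =>
  intro stack answer hm
  rcases stack with _ | ⟨⟨v, nk, c⟩, rest⟩
  · rw [pvLoop]; rfl
  · rw [pvLoop]
    show (if _h : pvChildren d v nk c = [] then pvLoop d rest (max answer c)
      else pvLoop d ((pvChildren d v nk c).reverse ++ rest) answer) = _
    have hpow : 0 < (d.length + 1) ^ (v.count false) := Nat.pow_pos (by omega)
    by_cases h : pvChildren d v nk c = []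
    · rw [dif_pos h]
      have hmu : pvMu d rest < m := by
        subst hm; simp only [pvMu, List.map_cons, List.sum_cons]; omega
      rw [IH _ hmu rest (max answer c) rfl, pvF_cons]
      have h0 : pvChildren d v nk 0 = [] :=
        List.map_eq_nil_iff.mp ((pvChildren_shift d v nk c).symm.trans h)
      have hg : pvG d v nk = 0 := by rw [pvG_eq, h0]; rfl
      show pvF _ rest (max answer c) = pvF _ rest (max answer (c + pvG d v nk))
      rw [hg, add_zero]
    · rw [dif_neg h]
      have hmu : pvMu d ((pvChildren d v nk c).reverse ++ rest) < m := by
        subst hm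
        simp only [pvMu, List.map_cons, List.sum_cons, List.map_append, List.sum_append,
          List.map_reverse, List.sum_reverse]
        have hlt := pvChildren_mu_lt h
        simp only [pvMu] at hlt
        omega
      rw [IH _ hmu _ answer rfl, pvF_append, pvF_reverse, pvF_cons]
      congr 1
      show pvF _ (pvChildren d v nk c) answer = _
      rw [pvChildren_shift d v nk c, pvF_map]
      rw [pvF_ext (ψ := fun s => c + (1 + pvG d s.1 s.2.1))
        (fun s => by show c + 1 + pvG d s.1 s.2.1 = _; ring) _ _]
      rw [pvF_shift_nonempty c _ answer (pvChildren_shift_ne h)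
        (fun x _ => by have := pvG_nonneg d x.1 x.2.1; omega)]
      rw [← pvG_eq]

-- B's recursion computes the value of the corresponding boolean-visited state
def pvBool (n : Nat) (V : List Nat) : List Bool :=
  (List.range n).map (fun j => decide (j ∈ V))

lemma pvBool_getD {n : Nat} {V : List Nat} {i : Nat} (hi : i < n) :
    (pvBool n V).getD i true = decide (i ∈ V) :=
  PySem.List.getD_map_range _ _ _ _ hi

lemma pvBool_set {n : Nat} {V : List Nat} {i : Nat} (hi : i < n) :
    (pvBool n V).set i true = pvBool n (V ++ [i]) := by
  apply List.ext_getElem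
  · simp [pvBool]
  · intro j h1 h2
    have hjn : j < n := by simpa [pvBool] using h2
    rw [List.getElem_set]
    by_cases hji : i = j
    · subst hji
      simp [pvBool, List.mem_append]
    · simp only [if_neg hji, pvBool, List.getElem_map, List.getElem_range,
        List.mem_append, List.mem_singleton]
      have : ¬ j = i := fun hh => hji hh.symm
      simp [this]

-- a loop that skips non-candidates equals the running maximum over the filtered list
lemma foldl_if_filterMap {σ : Type} (P : Nat → Prop) [DecidablePred P]
    (h : Nat → σ) (ψ : σ → Int) :
    ∀ (l : List Nat) (a : Int),
      l.foldl (fun res i => if P i then max res (ψ (h i)) else res) a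
        = pvF ψ (l.filterMap (fun i => if P i then some (h i) else none)) a := by
  intro l
  induction l with
  | nil => intro a; rfl
  | cons i t ih =>
    intro a
    by_cases hp : P i
    · simp only [List.foldl_cons, List.filterMap_cons, if_pos hp]
      rw [ih, pvF_cons]
    · simp only [List.foldl_cons, List.filterMap_cons, if_neg hp]
      rw [ih]

lemma bestRec_eq (d : List (List Int)) (V : List Nat) (f : Int) :
    bestRec d V f = pvG d (pvBool d.length V) f := by
  suffices H : ∀ (m : Nat) (V : List Nat) (f : Int),
      (List.range d.length).countP (fun j => decide (j ∉ V)) = m →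
      bestRec d V f = pvG d (pvBool d.length V) f from H _ V f rfl
  intro m
  induction m using Nat.strong_induction_on with
  | _ m IH =>
  intro V f hm
  rw [bestRec]
  refine Eq.trans (List.foldl_attach
    (l := List.range d.length)
    (f := fun res j => if _h : j ∉ V ∧ reqOf d j ≤ f then
        (let r := 1 + bestRec d (V ++ [j]) (f - costOf d j); if res < r then r else res)
      else res)
    (b := 0)) ?_
  have hcong : ∀ (acc : Int), ∀ j ∈ List.range d.length,
      (if _h : j ∉ V ∧ reqOf d j ≤ f then
        (let r := 1 + bestRec d (V ++ [j]) (f - costOf d j); if acc < r then r else acc)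
      else acc)
      = (if j ∉ V ∧ reqOf d j ≤ f then
        max acc (1 + pvG d ((pvBool d.length V).set j true) (f - costOf d j)) else acc) := by
    intro acc j hj
    by_cases hP : j ∉ V ∧ reqOf d j ≤ f
    · rw [dif_pos hP, if_pos hP]
      have hjn : j < d.length := List.mem_range.mp hj
      have hlt : (List.range d.length).countP (fun x => decide (x ∉ V ++ [j])) < m := by
        rw [← hm]; exact pvAvail_decrease hj hP.1
      have hrec : bestRec d (V ++ [j]) (f - costOf d j)
          = pvG d (pvBool d.length (V ++ [j])) (f - costOf d j) :=
        IH _ hlt (V ++ [j]) (f - costOf d j) rfl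
      show (if acc < 1 + bestRec d (V ++ [j]) (f - costOf d j) then _ else acc) = _
      rw [hrec, ← pvBool_set hjn]
      split_ifs <;> omega
    · rw [dif_neg hP, if_neg hP]
  rw [PySem.List.foldl_congr_mem _ _ _ 0 hcong]
  rw [foldl_if_filterMap (fun j => j ∉ V ∧ reqOf d j ≤ f)
    (fun j => (((pvBool d.length V).set j true), f - costOf d j, (0:Int) + 1))
    (fun s => 1 + pvG d s.1 s.2.1)]
  have hfm : (List.range d.length).filterMap (fun j =>
      if j ∉ V ∧ reqOf d j ≤ f then
        some (((pvBool d.length V).set j true), f - costOf d j, (0:Int) + 1)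
      else none) = pvChildren d (pvBool d.length V) f 0 := by
    unfold pvChildren
    apply List.filterMap_congr
    intro j hj
    have hjn := List.mem_range.mp hj
    by_cases hjV : j ∈ V
    · rw [if_neg (by simp [hjV]), if_neg (by rw [pvBool_getD hjn]; simp [hjV])]
    · by_cases hq : reqOf d j ≤ f
      · rw [if_pos ⟨hjV, hq⟩, if_pos ⟨by rw [pvBool_getD hjn]; simp [hjV], hq⟩]
      · rw [if_neg (fun hh => hq hh.2), if_neg (fun hh => hq hh.2)]
  rw [hfm, ← pvG_eq]

lemma pvF_congr_mem {α : Type} (l : List α) (φ ψ : α → Int) (a : Int)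
    (h : ∀ x ∈ l, φ x = ψ x) : pvF φ l a = pvF ψ l a := by
  unfold pvF
  exact PySem.List.foldl_congr_mem _ _ _ _ (fun acc x hx => by rw [h x hx])

lemma pvInit_eq (k : Int) (d : List (List Int)) :
    (List.range d.length).filterMap (fun i =>
      if reqOf d i ≤ k then
        some ((List.replicate d.length false).set i true, k - costOf d i, (1 : Int))
      else none) = pvChildren d (List.replicate d.length false) k 0 := by
  unfold pvChildren
  apply List.filterMap_congr
  intro i hi
  have hin := List.mem_range.mp hi
  have hrep : (List.replicate d.length false).getD i true = false := by
    rw [List.getD_eq_getElem _ _ (by simpa using hin)]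
    simp
  by_cases hq : reqOf d i ≤ k
  · rw [if_pos hq, if_pos ⟨hrep, hq⟩]
    norm_num
  · rw [if_neg hq, if_neg (fun hh => hq hh.2)]

lemma pvBool_nil (n : Nat) : pvBool n [] = List.replicate n false := by
  simp [pvBool, List.map_const']

-- when some dungeon is startable, A's search returns the value of the empty state
lemma pvSolution_eq_pvG (k : Int) (d : List (List Int))
    (hne : pvChildren d (List.replicate d.length false) k 0 ≠ []) :
    solution k d = pvG d (List.replicate d.length false) k := by
  obtain ⟨x, xs, hxxs⟩ : ∃ y ys,
      pvChildren d (List.replicate d.length false) k 0 = y :: ys := by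
    rcases hch : pvChildren d (List.replicate d.length false) k 0 with _ | ⟨y, ys⟩
    · exact absurd hch hne
    · exact ⟨y, ys, rfl⟩
  have hx1 : (0:Int) ≤ pvG d x.1 x.2.1 := pvG_nonneg d x.1 x.2.1
  have h0 : solution k d = pvLoop d (((List.range d.length).filterMap (fun i =>
      if reqOf d i ≤ k then
        some ((List.replicate d.length false).set i true, k - costOf d i, (1 : Int))
      else none)).reverse) (-1) := rfl
  rw [h0, pvInit_eq k d, pvLoop_eq, pvF_reverse]
  rw [pvF_congr_mem _ _ (fun s => 1 + pvG d s.1 s.2.1) _ (fun s hs => by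
    obtain ⟨i, _, _, _, rfl⟩ := mem_pvChildren.1 hs
    show 0 + 1 + pvG d _ _ = 1 + pvG d _ _
    ring)]
  rw [pvG_eq, hxxs, pvF_cons, pvF_cons]
  congr 1
  show max (-1) (1 + pvG d x.1 x.2.1) = max 0 (1 + pvG d x.1 x.2.1)
  omega

lemma pvAlt_eq (k : Int) (d : List (List Int)) :
    solution_alt k d = pvG d (List.replicate d.length false) k := by
  show bestRec d [] k = _
  rw [bestRec_eq, pvBool_nil]

-- inside D_: no dungeon is startable at all
lemma pvD_noReq {k : Int} {d : List (List Int)} (hD : D_solution k d) :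
    ∀ i ∈ List.range d.length, ¬ reqOf d i ≤ k := by
  intro i hi hle
  have hin := List.mem_range.mp hi
  have hk := hD d[i] (List.getElem_mem hin)
  unfold reqOf at hle
  rw [List.getD_eq_getElem _ _ hin] at hle
  omega

lemma pvInD_A (k : Int) (d : List (List Int)) (hD : D_solution k d) :
    solution k d = -1 := by
  have h0 : solution k d = pvLoop d (((List.range d.length).filterMap (fun i =>
      if reqOf d i ≤ k then
        some ((List.replicate d.length false).set i true, k - costOf d i, (1 : Int))
      else none)).reverse) (-1) := rfl
  rw [h0, List.filterMap_eq_nil_iff.mpr (fun i hi => if_neg (pvD_noReq hD i hi))]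
  rw [List.reverse_nil, pvLoop]

lemma pvInD_B (k : Int) (d : List (List Int)) (hD : D_solution k d) :
    solution_alt k d = 0 := by
  rw [pvAlt_eq, pvG_eq]
  have hch : pvChildren d (List.replicate d.length false) k 0 = [] :=
    List.filterMap_eq_nil_iff.mpr (fun i hi => if_neg (fun hh => pvD_noReq hD i hi hh.2))
  rw [hch]
  rfl

-- ===== VERDICT (by name: the statement is the Claim_ definition above) =====
theorem solution_spec : Claim_unchanged_solution := by
  unfold Claim_unchanged_solution
  intro k d _ _
  intro hnD
  obtain ⟨row, hrow, hle⟩ : ∃ row ∈ d, row.getD 0 0 ≤ k := by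
    by_contra hc
    exact hnD (fun row hr => by
      by_contra hlt
      exact hc ⟨row, hr, by omega⟩)
  obtain ⟨i, hin, hrow_eq⟩ := List.mem_iff_getElem.mp hrow
  have hne : pvChildren d (List.replicate d.length false) k 0 ≠ [] := by
    intro hnil
    have hmem := List.filterMap_eq_nil_iff.mp hnil i (List.mem_range.mpr hin)
    have hrep : (List.replicate d.length false).getD i true = false := by
      rw [List.getD_eq_getElem _ _ (by simpa using hin)]
      simp
    have hreq : reqOf d i ≤ k := by
      unfold reqOf
      rw [List.getD_eq_getElem _ _ hin, hrow_eq]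
      exact hle
    rw [if_pos ⟨hrep, hreq⟩] at hmem
    simp at hmem
  rw [pvSolution_eq_pvG k d hne, pvAlt_eq]

theorem solution_changed : Claim_changed_solution := by
  unfold Claim_changed_solution
  refine ⟨by decide, by decide, by decide, ?_, ?_, by decide⟩
  · exact pvInD_A _ _ (by decide)
  · exact pvInD_B _ _ (by decide)

theorem solution_tight : Claim_exact_solution := by
  unfold Claim_exact_solution
  intro k d _ _ hD
  have h1 := pvInD_A k d hD
  have h2 := pvInD_B k d hD
  omega
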